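-- pv_equiv track=rewrite | github.com/ticofookfook/xxe-tester | xxe_payload_generator.py | _case_variation
-- ===== SOURCE A (Python) =====
-- def _case_variation(payload: str) -> str:
--     """Vary the case of DOCTYPE, ENTITY, SYSTEM keywords."""
--     variations = {
--         "DOCTYPE": "dOcTyPe",
--         "ENTITY": "EnTiTy",
--         "SYSTEM": "SyStEm",
--         "PUBLIC": "PuBlIc",
--         "xml": "XmL"
--     }
--
--     result = payload
--     for original, varied in variations.items():
--         result = result.replace(original, varied)
--
--     return result
-- ===== SOURCE B (Python) =====
-- # Single left-to-right scan substituting each keyword via table lookup,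
-- # instead of five full-string replace passes.
-- def _case_variation(payload: str) -> str:
--     table = (("DOCTYPE", "dOcTyPe"), ("ENTITY", "EnTiTy"),
--              ("SYSTEM", "SyStEm"), ("PUBLIC", "PuBlIc"), ("xml", "XmL"))
--     out = []
--     i = 0
--     n = len(payload)
--     while i < n:
--         for orig, varied in table:
--             if payload.startswith(orig, i):
--                 out.append(varied)
--                 i += len(orig)
--                 break
--         else:
--             out.append(payload[i])
--             i += 1
--     return "".join(out)
-- ===== Notes on version B (the rewrite author's own statement) =====
-- stated objective: alternative
-- what changed: Replaced A's five sequential full-string str.replace passes by a single left-to-right scan that, at each index, tries the five keywords in order and substitutes the matched one via a lookup table.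
import Mathlib
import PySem

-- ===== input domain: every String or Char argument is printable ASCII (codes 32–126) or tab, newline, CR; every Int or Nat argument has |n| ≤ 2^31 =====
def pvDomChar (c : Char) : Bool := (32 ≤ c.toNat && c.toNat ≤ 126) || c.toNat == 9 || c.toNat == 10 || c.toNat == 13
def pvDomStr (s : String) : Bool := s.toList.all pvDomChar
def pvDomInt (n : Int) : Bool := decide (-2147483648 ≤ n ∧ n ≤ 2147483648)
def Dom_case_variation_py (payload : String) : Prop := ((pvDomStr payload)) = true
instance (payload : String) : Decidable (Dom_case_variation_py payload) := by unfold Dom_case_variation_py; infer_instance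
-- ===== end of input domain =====

-- B replaces A's five sequential full-string .replace passes by ONE left-to-right scan that
-- substitutes each keyword via table lookup; alternative decomposition, same observable result.

-- ===== PORT A =====
def case_variation_py (payload : String) : String :=
  let variations : PySem.Dict String String :=
    PySem.Dict.ofList [("DOCTYPE", "dOcTyPe"), ("ENTITY", "EnTiTy"),
                       ("SYSTEM", "SyStEm"), ("PUBLIC", "PuBlIc"), ("xml", "XmL")]
  variations.items.foldl (fun result p => PySem.Str.replace result p.1 p.2) payload

-- ===== PORT B =====
-- the scan of Source B: at each index try the keywords in order; on a hit emit the varied form and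
-- jump past the keyword, otherwise emit the character and advance by one
def pvScan : List Char → List Char
  | [] => []
  | c :: t =>
    if "DOCTYPE".toList.isPrefixOf (c :: t) then "dOcTyPe".toList ++ pvScan (t.drop 6)
    else if "ENTITY".toList.isPrefixOf (c :: t) then "EnTiTy".toList ++ pvScan (t.drop 5)
    else if "SYSTEM".toList.isPrefixOf (c :: t) then "SyStEm".toList ++ pvScan (t.drop 5)
    else if "PUBLIC".toList.isPrefixOf (c :: t) then "PuBlIc".toList ++ pvScan (t.drop 5)
    else if "xml".toList.isPrefixOf (c :: t) then "XmL".toList ++ pvScan (t.drop 2)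
    else c :: pvScan t
  termination_by l => l.length
  decreasing_by all_goals (simp; try omega)

def case_variation_py_alt (payload : String) : String :=
  String.ofList (pvScan payload.toList)

-- ===== PRECONDITION & SPEC =====
def Spec_case_variation_py (payload : String) (out : String) : Prop := out = case_variation_py_alt payload
instance (payload : String) (out : String) : Decidable (Spec_case_variation_py payload out) := by unfold Spec_case_variation_py; infer_instance

-- ===== CLAIM (what is proved, stated in full; the proofs are below) =====
def Claim_equal_case_variation_py : Prop := ∀ (payload : String), Dom_case_variation_py payload → Spec_case_variation_py payload (case_variation_py payload)

-- ===== LEMMAS AND PROOFS =====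

-- single leftmost replace pass: the recursion PySem.Chars.replace.go performs (for old ≠ [])
def pvRepl (old new : List Char) : List Char → List Char
  | [] => []
  | c :: t =>
    if old.isPrefixOf (c :: t) then new ++ pvRepl old new (t.drop (old.length - 1))
    else c :: pvRepl old new t
  termination_by l => l.length
  decreasing_by all_goals (simp; try omega)

theorem pvRepl_nil (old new : List Char) : pvRepl old new [] = [] := by simp [pvRepl]

theorem pvRepl_cons (old new : List Char) (c : Char) (t : List Char) :
    pvRepl old new (c :: t) =
      if old.isPrefixOf (c :: t) then new ++ pvRepl old new (t.drop (old.length - 1))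
      else c :: pvRepl old new t := by
  rw [pvRepl]

theorem pvRepl_cons_neg (old new : List Char) (c : Char) (t : List Char)
    (h : ¬ old.isPrefixOf (c :: t)) :
    pvRepl old new (c :: t) = c :: pvRepl old new t := by
  rw [pvRepl_cons, if_neg h]

theorem pvScan_cons (c : Char) (t : List Char) :
    pvScan (c :: t) =
      if "DOCTYPE".toList.isPrefixOf (c :: t) then "dOcTyPe".toList ++ pvScan (t.drop 6)
      else if "ENTITY".toList.isPrefixOf (c :: t) then "EnTiTy".toList ++ pvScan (t.drop 5)
      else if "SYSTEM".toList.isPrefixOf (c :: t) then "SyStEm".toList ++ pvScan (t.drop 5)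
      else if "PUBLIC".toList.isPrefixOf (c :: t) then "PuBlIc".toList ++ pvScan (t.drop 5)
      else if "xml".toList.isPrefixOf (c :: t) then "XmL".toList ++ pvScan (t.drop 2)
      else c :: pvScan t := by
  rw [pvScan]

theorem pvGo_eq (old new : List Char) (hold : old ≠ []) :
    ∀ (fuel : Nat) (l acc : List Char), l.length ≤ fuel →
      PySem.Chars.replace.go old new fuel l acc = acc.reverse ++ pvRepl old new l := by
  intro fuel
  induction fuel with
  | zero =>
    intro l acc hl
    have : l = [] := List.eq_nil_of_length_eq_zero (Nat.le_zero.mp hl)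
    subst this
    simp [PySem.Chars.replace.go, pvRepl_nil]
  | succ n ih =>
    intro l acc hl
    cases l with
    | nil => simp [PySem.Chars.replace.go, pvRepl_nil]
    | cons c t =>
      rw [PySem.Chars.replace.go]
      by_cases hp : old.isPrefixOf (c :: t)
      · simp only [hp, if_true]
        have hdrop : List.drop old.length (c :: t) = t.drop (old.length - 1) := by
          cases old with
          | nil => exact absurd rfl hold
          | cons o os => simp
        rw [hdrop]
        have hle : (t.drop (old.length - 1)).length ≤ n := by
          simp at hl ⊢
          omega
        rw [ih _ _ hle, pvRepl_cons, if_pos hp]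
        simp
      · simp only [hp]
        have hle : t.length ≤ n := by simp at hl; omega
        rw [ih _ _ hle, pvRepl_cons, if_neg hp]
        simp

theorem replace_eq_pvRepl (s old new : List Char) (hold : old ≠ []) :
    PySem.Chars.replace s old new = pvRepl old new s := by
  rw [PySem.Chars.replace]
  have h : old.isEmpty = false := by
    cases old with
    | nil => exact absurd rfl hold
    | cons _ _ => rfl
  rw [h]
  simp only [Bool.false_eq_true, if_false]
  exact pvGo_eq old new hold s.length s [] (le_refl _)

-- 'old never matches starting strictly inside a': no drop of a is prefix-comparable with old
abbrev pvNoOcc (a old : List Char) : Prop :=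
  ∀ i < a.length, ¬ (a.drop i <+: old) ∧ ¬ (old <+: a.drop i)

theorem pvNoOcc_tail (a old : List Char) (c : Char) (h : pvNoOcc (c :: a) old) : pvNoOcc a old := by
  intro i hi
  have := h (i + 1) (by simp; omega)
  simpa using this

-- a block 'a' that 'old' cannot match inside is copied unchanged by the pass
theorem pvRepl_skip (old new : List Char) (a : List Char) (h : pvNoOcc a old) :
    ∀ t, pvRepl old new (a ++ t) = a ++ pvRepl old new t := by
  induction a with
  | nil => intro t; simp
  | cons c a' ih =>
    intro t
    have hnp : ¬ old.isPrefixOf (c :: (a' ++ t)) := by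
      rw [List.isPrefixOf_iff_prefix]
      intro hpre
      have hpa : (c :: a') <+: c :: (a' ++ t) := ⟨t, by simp⟩
      have hcmp := List.prefix_or_prefix_of_prefix hpre hpa
      have h0 := h 0 (by simp)
      simp only [List.drop_zero] at h0
      rcases hcmp with h' | h'
      · exact h0.2 h'
      · exact h0.1 h'
    rw [List.cons_append, pvRepl_cons_neg _ _ _ _ hnp, ih (pvNoOcc_tail a' old c h) t]
    simp

-- a match of 'old' at the head is replaced by 'new'
theorem pvRepl_head (old new t : List Char) (hold : old ≠ []) :
    pvRepl old new (old ++ t) = new ++ pvRepl old new t := by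
  cases old with
  | nil => exact absurd rfl hold
  | cons o os =>
    rw [List.cons_append, pvRepl_cons, if_pos]
    · have hd : List.drop ((o :: os).length - 1) (os ++ t) = t := by
        simp only [List.length_cons, Nat.add_sub_cancel]
        exact List.drop_left
      rw [hd]
    · rw [List.isPrefixOf_iff_prefix]
      exact ⟨t, by simp⟩

-- a prefix w that cannot straddle the replacement text 'new' survives a replace pass backwards
theorem pvRepl_reflect (old new : List Char) :
    ∀ (u w : List Char), pvNoOcc w new → w <+: pvRepl old new u → w <+: u := by
  intro u
  induction u using pvRepl.induct (old := old) with
  | case1 =>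
    intro w _ hw
    rw [pvRepl_nil] at hw
    rw [List.prefix_nil] at hw
    simp [hw]
  | case2 c t hp _ =>
    intro w hno hw
    rw [pvRepl_cons, if_pos hp] at hw
    cases w with
    | nil => exact List.nil_prefix
    | cons a w' =>
      have h0 := hno 0 (by simp)
      simp only [List.drop_zero] at h0
      have hnew : new <+: new ++ pvRepl old new (t.drop (old.length - 1)) := ⟨_, rfl⟩
      rcases List.prefix_or_prefix_of_prefix hw hnew with h' | h'
      · exact absurd h' h0.1
      · exact absurd h' h0.2
  | case3 c t hp ih =>
    intro w hno hw
    rw [pvRepl_cons_neg _ _ _ _ hp] at hw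
    cases w with
    | nil => exact List.nil_prefix
    | cons a w' =>
      rw [List.cons_prefix_cons] at hw
      have hw' := ih w' (pvNoOcc_tail w' new a hno) hw.2
      exact List.cons_prefix_cons.mpr ⟨hw.1, hw'⟩

-- if k does not match at c :: t, it does not match at c :: (one replace pass over t)
theorem pv_not_prefix_repl (old new k : List Char) (hk : k ≠ []) (hno : pvNoOcc k.tail new)
    (c : Char) (t : List Char) (h : ¬ k.isPrefixOf (c :: t)) :
    ¬ k.isPrefixOf (c :: pvRepl old new t) := by
  intro hp
  rw [List.isPrefixOf_iff_prefix] at hp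
  apply h
  rw [List.isPrefixOf_iff_prefix]
  cases k with
  | nil => exact absurd rfl hk
  | cons a k' =>
    rw [List.cons_prefix_cons] at hp
    have := pvRepl_reflect old new t k' hno hp.2
    exact List.cons_prefix_cons.mpr ⟨hp.1, this⟩

-- the five composed replace passes equal the single scan
theorem pvChain_eq_scan :
    ∀ u : List Char,
      pvRepl "xml".toList "XmL".toList
        (pvRepl "PUBLIC".toList "PuBlIc".toList
          (pvRepl "SYSTEM".toList "SyStEm".toList
            (pvRepl "ENTITY".toList "EnTiTy".toList
              (pvRepl "DOCTYPE".toList "dOcTyPe".toList u)))) = pvScan u := by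
  intro u
  induction u using pvScan.induct with
  | case1 =>
    simp [pvRepl_nil, pvScan]
  | case2 c t h1 ih =>
    obtain ⟨t', ht⟩ := List.isPrefixOf_iff_prefix.mp h1
    have hdrop : t.drop 6 = t' := by
      have hcg := congrArg (List.drop 7) ht
      rw [show "DOCTYPE".toList = ['D', 'O', 'C', 'T', 'Y', 'P', 'E'] from rfl] at hcg
      simpa using hcg.symm
    rw [hdrop] at ih
    rw [← ht, pvRepl_head _ _ _ (by decide),
        pvRepl_skip _ _ _ (by decide),
        pvRepl_skip _ _ _ (by decide),
        pvRepl_skip _ _ _ (by decide),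
        pvRepl_skip _ _ _ (by decide)]
    rw [ht, pvScan_cons, if_pos h1, hdrop, ih]
  | case3 c t h1 h2 ih =>
    obtain ⟨t', ht⟩ := List.isPrefixOf_iff_prefix.mp h2
    have hdrop : t.drop 5 = t' := by
      have hcg := congrArg (List.drop 6) ht
      rw [show "ENTITY".toList = ['E', 'N', 'T', 'I', 'T', 'Y'] from rfl] at hcg
      simpa using hcg.symm
    rw [hdrop] at ih
    rw [← ht, pvRepl_skip _ _ _ (by decide),
        pvRepl_head _ _ _ (by decide),
        pvRepl_skip _ _ _ (by decide),
        pvRepl_skip _ _ _ (by decide),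
        pvRepl_skip _ _ _ (by decide)]
    rw [ht, pvScan_cons, if_neg h1, if_pos h2, hdrop, ih]
  | case4 c t h1 h2 h3 ih =>
    obtain ⟨t', ht⟩ := List.isPrefixOf_iff_prefix.mp h3
    have hdrop : t.drop 5 = t' := by
      have hcg := congrArg (List.drop 6) ht
      rw [show "SYSTEM".toList = ['S', 'Y', 'S', 'T', 'E', 'M'] from rfl] at hcg
      simpa using hcg.symm
    rw [hdrop] at ih
    rw [← ht, pvRepl_skip _ _ _ (by decide),
        pvRepl_skip _ _ _ (by decide),
        pvRepl_head _ _ _ (by decide),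
        pvRepl_skip _ _ _ (by decide),
        pvRepl_skip _ _ _ (by decide)]
    rw [ht, pvScan_cons, if_neg h1, if_neg h2, if_pos h3, hdrop, ih]
  | case5 c t h1 h2 h3 h4 ih =>
    obtain ⟨t', ht⟩ := List.isPrefixOf_iff_prefix.mp h4
    have hdrop : t.drop 5 = t' := by
      have hcg := congrArg (List.drop 6) ht
      rw [show "PUBLIC".toList = ['P', 'U', 'B', 'L', 'I', 'C'] from rfl] at hcg
      simpa using hcg.symm
    rw [hdrop] at ih
    rw [← ht, pvRepl_skip _ _ _ (by decide),
        pvRepl_skip _ _ _ (by decide),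
        pvRepl_skip _ _ _ (by decide),
        pvRepl_head _ _ _ (by decide),
        pvRepl_skip _ _ _ (by decide)]
    rw [ht, pvScan_cons, if_neg h1, if_neg h2, if_neg h3, if_pos h4, hdrop, ih]
  | case6 c t h1 h2 h3 h4 h5 ih =>
    obtain ⟨t', ht⟩ := List.isPrefixOf_iff_prefix.mp h5
    have hdrop : t.drop 2 = t' := by
      have hcg := congrArg (List.drop 3) ht
      rw [show "xml".toList = ['x', 'm', 'l'] from rfl] at hcg
      simpa using hcg.symm
    rw [hdrop] at ih
    rw [← ht, pvRepl_skip _ _ _ (by decide),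
        pvRepl_skip _ _ _ (by decide),
        pvRepl_skip _ _ _ (by decide),
        pvRepl_skip _ _ _ (by decide),
        pvRepl_head _ _ _ (by decide)]
    rw [ht, pvScan_cons, if_neg h1, if_neg h2, if_neg h3, if_neg h4, if_pos h5, hdrop, ih]
  | case7 c t h1 h2 h3 h4 h5 ih =>
    have n2 := pv_not_prefix_repl "DOCTYPE".toList "dOcTyPe".toList "ENTITY".toList
      (by decide) (by decide) c t h2
    have n3 := pv_not_prefix_repl "ENTITY".toList "EnTiTy".toList "SYSTEM".toList
      (by decide) (by decide) c _
      (pv_not_prefix_repl "DOCTYPE".toList "dOcTyPe".toList "SYSTEM".toList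
        (by decide) (by decide) c t h3)
    have n4 := pv_not_prefix_repl "SYSTEM".toList "SyStEm".toList "PUBLIC".toList
      (by decide) (by decide) c _
      (pv_not_prefix_repl "ENTITY".toList "EnTiTy".toList "PUBLIC".toList
        (by decide) (by decide) c _
        (pv_not_prefix_repl "DOCTYPE".toList "dOcTyPe".toList "PUBLIC".toList
          (by decide) (by decide) c t h4))
    have n5 := pv_not_prefix_repl "PUBLIC".toList "PuBlIc".toList "xml".toList
      (by decide) (by decide) c _
      (pv_not_prefix_repl "SYSTEM".toList "SyStEm".toList "xml".toList
        (by decide) (by decide) c _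
        (pv_not_prefix_repl "ENTITY".toList "EnTiTy".toList "xml".toList
          (by decide) (by decide) c _
          (pv_not_prefix_repl "DOCTYPE".toList "dOcTyPe".toList "xml".toList
            (by decide) (by decide) c t h5)))
    rw [pvRepl_cons_neg _ _ _ _ h1,
        pvRepl_cons_neg _ _ _ _ n2,
        pvRepl_cons_neg _ _ _ _ n3,
        pvRepl_cons_neg _ _ _ _ n4,
        pvRepl_cons_neg _ _ _ _ n5]
    rw [pvScan_cons, if_neg h1, if_neg h2, if_neg h3, if_neg h4, if_neg h5, ih]

-- ===== VERDICT (by name: the statement is the Claim_ definition above) =====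
theorem case_variation_py_spec : Claim_equal_case_variation_py := by
  intro payload _
  unfold Spec_case_variation_py case_variation_py case_variation_py_alt
  have hitems : (PySem.Dict.ofList [("DOCTYPE", "dOcTyPe"), ("ENTITY", "EnTiTy"),
      ("SYSTEM", "SyStEm"), ("PUBLIC", "PuBlIc"), ("xml", "XmL")] :
      PySem.Dict String String).items =
      [("DOCTYPE", "dOcTyPe"), ("ENTITY", "EnTiTy"),
       ("SYSTEM", "SyStEm"), ("PUBLIC", "PuBlIc"), ("xml", "XmL")] := by rfl
  simp only [hitems, List.foldl, PySem.Str.replace, String.toList_ofList]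
  rw [replace_eq_pvRepl _ _ _ (by decide), replace_eq_pvRepl _ _ _ (by decide),
      replace_eq_pvRepl _ _ _ (by decide), replace_eq_pvRepl _ _ _ (by decide),
      replace_eq_pvRepl _ _ _ (by decide)]
  rw [pvChain_eq_scan]
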